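-- pv_equiv track=rewrite | github.com/shauryasf/Advent-of-code | AOC 2024/day22.py | solve
-- ===== SOURCE A (Python) =====
-- from collections import defaultdict
--
-- def solve(data):
--     data = list(map(int, data.split("\n")))
--     MOD = 16777216
--
--     seq = defaultdict(int)
--     p1 = 0
--
--     for num in data:
--         prev = num
--         n = num
--         changes = []
--         nums = []
--         for _ in range(2000):
--             n = n ^ (n * 64)
--             n %= MOD
--             n = n ^ (n//32)
--             n %= MOD
--             n = n ^ (n * 2048)
--             n %= MOD
--             changes.append(n % 10 - prev % 10)
--             nums.append(n % 10)
--             prev = n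
--
--         p1 += n
--
--         vis = set()
--
--         for i in range(3, len(changes)):
--             tup = (changes[i-3], changes[i-2], changes[i-1], changes[i])
--             if tup in vis:
--                 continue
--             vis.add(tup)
--             seq[tup] += nums[i]
--
--     p2 = max(seq.values())
--
--     return p1, p2
-- ===== SOURCE B (Python) =====
-- def solve(data):
--     nums = [int(x) for x in data.split("\n")]
--     MOD = 16777216
--     seq = {}
--     p1 = 0
--     for num in nums:
--         prev = num
--         n = num
--         w = ()
--         vis = set()
--         for _ in range(2000):
--             n = n ^ (n * 64)
--             n %= MOD
--             n = n ^ (n // 32)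
--             n %= MOD
--             n = n ^ (n * 2048)
--             n %= MOD
--             c = n % 10 - prev % 10
--             if len(w) == 3:
--                 key = w + (c,)
--                 if key not in vis:
--                     vis.add(key)
--                     seq[key] = seq.get(key, 0) + n % 10
--                 w = w[1:] + (c,)
--             else:
--                 w = w + (c,)
--             prev = n
--         p1 += n
--     return p1, max(seq.values())
-- ===== Notes on version B (the rewrite author's own statement) =====
-- stated objective: alternative
-- what changed: Per secret, B replaces A's two-phase build-2000-element-changes/nums-lists-then-rescan-by-index with a single streaming pass that keeps only a rolling 3-element window of recent price changes and a per-secret seen set, updating the global dict as each change is produced.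
import Mathlib
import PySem

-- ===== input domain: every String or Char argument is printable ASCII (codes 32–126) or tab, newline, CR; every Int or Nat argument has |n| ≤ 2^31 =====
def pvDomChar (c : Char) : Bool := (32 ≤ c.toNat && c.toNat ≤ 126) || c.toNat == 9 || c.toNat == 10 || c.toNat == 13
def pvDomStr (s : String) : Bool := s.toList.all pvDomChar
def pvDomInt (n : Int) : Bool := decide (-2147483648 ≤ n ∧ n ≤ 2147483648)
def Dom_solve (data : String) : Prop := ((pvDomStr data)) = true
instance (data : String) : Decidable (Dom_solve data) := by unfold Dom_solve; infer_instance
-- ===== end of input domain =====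

-- B replaces A's per-secret build-two-2000-lists-then-rescan-by-index with one streaming pass
-- holding a rolling window of the last three price changes (objective: simpler/alternative).

-- shared helper: the three xor/mod steps both Pythons perform to advance a secret
def pvNext (n : Int) : Int :=
  let n1 := PySem.Int.mod (PySem.Int.bxor n (n * 64)) 16777216
  let n2 := PySem.Int.mod (PySem.Int.bxor n1 (PySem.Int.floordiv n1 32)) 16777216
  PySem.Int.mod (PySem.Int.bxor n2 (n2 * 2048)) 16777216

-- ===== PORT A =====
def solve (data : String) : Int × Int :=
  let nums := ((PySem.Str.split? data "\n").getD []).map (fun s => (PySem.Int.ofStr? s).getD 0)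
  let res := nums.foldl (fun (acc : PySem.Dict (Int × Int × Int × Int) Int × Int) num =>
      let st := (PySem.List.pyRange 0 2000 1).foldl
        (fun (st : Int × Int × List Int × List Int) _ =>
          let n' := pvNext st.1
          (n', n', st.2.2.1 ++ [PySem.Int.mod n' 10 - PySem.Int.mod st.2.1 10],
           st.2.2.2 ++ [PySem.Int.mod n' 10]))
        (num, num, ([] : List Int), ([] : List Int))
      let changes := st.2.2.1
      let nms := st.2.2.2
      let p1' := acc.2 + st.1
      let scanned := (PySem.List.pyRange 3 (PySem.List.len changes) 1).foldl
        (fun (vs : PySem.Set (Int × Int × Int × Int) × PySem.Dict (Int × Int × Int × Int) Int) i =>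
          let tup := (PySem.List.pyGetD changes (i-3) 0, PySem.List.pyGetD changes (i-2) 0,
                      PySem.List.pyGetD changes (i-1) 0, PySem.List.pyGetD changes i 0)
          if PySem.Set.contains vs.1 tup then vs
          else (PySem.Set.add vs.1 tup, vs.2.modify tup 0 (· + PySem.List.pyGetD nms i 0)))
        (PySem.Set.empty, acc.1)
      (scanned.2, p1'))
    (PySem.Dict.empty, 0)
  (res.2, (PySem.List.max? (PySem.Dict.values res.1) (fun x => x)).getD 0)

-- ===== PORT B =====
def solve_alt (data : String) : Int × Int :=
  let nums := ((PySem.Str.split? data "\n").getD []).map (fun s => (PySem.Int.ofStr? s).getD 0)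
  let res := nums.foldl (fun (acc : PySem.Dict (Int × Int × Int × Int) Int × Int) num =>
      let st := (PySem.List.pyRange 0 2000 1).foldl
        (fun (st : Int × Int × List Int × PySem.Set (Int × Int × Int × Int) ×
                    PySem.Dict (Int × Int × Int × Int) Int) _ =>
          let n' := pvNext st.1
          let c := PySem.Int.mod n' 10 - PySem.Int.mod st.2.1 10
          match st.2.2.1 with
          | [a, b, d] =>
            if PySem.Set.contains st.2.2.2.1 (a, b, d, c) then (n', n', [b, d, c], st.2.2.2)
            else (n', n', [b, d, c], PySem.Set.add st.2.2.2.1 (a, b, d, c),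
                  st.2.2.2.2.insert (a, b, d, c) (st.2.2.2.2.getD (a, b, d, c) 0 + PySem.Int.mod n' 10))
          | w => (n', n', w ++ [c], st.2.2.2))
        (num, num, ([] : List Int), (PySem.Set.empty, acc.1))
      (st.2.2.2.2, acc.2 + st.1))
    (PySem.Dict.empty, 0)
  (res.2, (PySem.List.max? (PySem.Dict.values res.1) (fun x => x)).getD 0)

-- ===== PRECONDITION & SPEC =====
-- Pre_ excludes exactly the inputs where some line fails int() and Python A raises ValueError.
def Pre_solve (data : String) : Prop :=
  ∀ s ∈ (PySem.Str.split? data "\n").getD [], (PySem.Int.ofStr? s).isSome = true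
instance (data : String) : Decidable (Pre_solve data) := by unfold Pre_solve; infer_instance

def pvWitness_solve : String := "1\n2"

def Spec_solve (data : String) (out : Int × Int) : Prop := out = solve_alt data
instance (data : String) (out : Int × Int) : Decidable (Spec_solve data out) := by
  unfold Spec_solve; infer_instance

-- ===== CLAIM (what is proved, stated in full; the proofs are below) =====
def Claim_equal_solve : Prop := ∀ (data : String), Dom_solve data → Pre_solve data → Spec_solve data (solve data)

-- ===== LEMMAS AND PROOFS =====

-- A's inner build step (one iteration of A's 2000-loop), as a function of the state
def pvStepA (st : Int × Int × List Int × List Int) : Int × Int × List Int × List Int :=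
  let n' := pvNext st.1
  (n', n', st.2.2.1 ++ [PySem.Int.mod n' 10 - PySem.Int.mod st.2.1 10],
   st.2.2.2 ++ [PySem.Int.mod n' 10])

-- A's scan step over index i, with the two lists fixed
def pvScanStep (changes nms : List Int)
    (vs : PySem.Set (Int × Int × Int × Int) × PySem.Dict (Int × Int × Int × Int) Int)
    (i : Int) :
    PySem.Set (Int × Int × Int × Int) × PySem.Dict (Int × Int × Int × Int) Int :=
  let tup := (PySem.List.pyGetD changes (i-3) 0, PySem.List.pyGetD changes (i-2) 0,
              PySem.List.pyGetD changes (i-1) 0, PySem.List.pyGetD changes i 0)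
  if PySem.Set.contains vs.1 tup then vs
  else (PySem.Set.add vs.1 tup, vs.2.modify tup 0 (· + PySem.List.pyGetD nms i 0))

-- B's streaming step
def pvStepB (st : Int × Int × List Int × PySem.Set (Int × Int × Int × Int) ×
                  PySem.Dict (Int × Int × Int × Int) Int) :
    Int × Int × List Int × PySem.Set (Int × Int × Int × Int) ×
    PySem.Dict (Int × Int × Int × Int) Int :=
  let n' := pvNext st.1
  let c := PySem.Int.mod n' 10 - PySem.Int.mod st.2.1 10
  match st.2.2.1 with
  | [a, b, d] =>
    if PySem.Set.contains st.2.2.2.1 (a, b, d, c) then (n', n', [b, d, c], st.2.2.2)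
    else (n', n', [b, d, c], PySem.Set.add st.2.2.2.1 (a, b, d, c),
          st.2.2.2.2.insert (a, b, d, c) (st.2.2.2.2.getD (a, b, d, c) 0 + PySem.Int.mod n' 10))
  | w => (n', n', w ++ [c], st.2.2.2)

def pvA (k : Nat) (num : Int) : Int × Int × List Int × List Int :=
  pvStepA^[k] (num, num, [], [])

lemma pvFoldl_const_iterate {σ α : Type} (l : List α) (f : σ → σ) (init : σ) :
    l.foldl (fun s _ => f s) init = f^[l.length] init := by
  induction l generalizing init with
  | nil => rfl
  | cons x xs ih => simp [List.foldl_cons, ih, Function.iterate_succ_apply]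

lemma pvLenA (k : Nat) (num : Int) :
    (pvA k num).2.2.1.length = k ∧ (pvA k num).2.2.2.length = k := by
  induction k with
  | zero => simp [pvA]
  | succ k ih =>
    have : pvA (k+1) num = pvStepA (pvA k num) := Function.iterate_succ_apply' _ _ _
    rw [this, pvStepA]
    simp [ih.1, ih.2]

lemma pvGetD_append_lt (xs ys : List Int) (j : Int) (d : Int)
    (h0 : 0 ≤ j) (h1 : j < (xs.length : Int)) :
    PySem.List.pyGetD (xs ++ ys) j d = PySem.List.pyGetD xs j d := by
  rw [PySem.List.pyGetD_eq_getElem _ d h0 (by simp; omega),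
      PySem.List.pyGetD_eq_getElem _ d h0 h1]
  exact List.getElem_append_left (by omega)

lemma pvDrop3 (l : List Int) (h : 3 ≤ l.length) :
    l.drop (l.length - 3) =
      [l[l.length-3]'(by omega), l[l.length-2]'(by omega), l[l.length-1]'(by omega)] := by
  have h3 : (l.drop (l.length-3)).length = 3 := by simp; omega
  apply List.ext_getElem (by simp [h3])
  intro j hj1 hj2
  rw [List.getElem_drop]
  have hj3 : j < 3 := by omega
  interval_cases j
  · simp
  · simp; congr 1; omega
  · simp; congr 1; omega

lemma pvStepB_short (n p : Int) (w : List Int)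
    (vs : PySem.Set (Int × Int × Int × Int) × PySem.Dict (Int × Int × Int × Int) Int)
    (hw : w.length ≠ 3) :
    pvStepB (n, p, w, vs) =
      (pvNext n, pvNext n,
       w ++ [PySem.Int.mod (pvNext n) 10 - PySem.Int.mod p 10], vs) := by
  rcases w with _ | ⟨a, w⟩
  · rfl
  rcases w with _ | ⟨b, w⟩
  · rfl
  rcases w with _ | ⟨d, w⟩
  · rfl
  rcases w with _ | ⟨e, w⟩
  · simp at hw
  · rfl

lemma pvDrop2 (l : List Int) (h : 2 ≤ l.length) :
    l.drop (l.length - 2) = [l[l.length-2]'(by omega), l[l.length-1]'(by omega)] := by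
  have h2 : (l.drop (l.length-2)).length = 2 := by simp; omega
  apply List.ext_getElem (by simp [h2])
  intro j hj1 hj2
  rw [List.getElem_drop]
  have hj3 : j < 2 := by omega
  interval_cases j
  · simp
  · simp
    congr 1
    omega

lemma pvDropWin (l : List Int) (x : Int) (h : 3 ≤ l.length) :
    (l ++ [x]).drop ((l ++ [x]).length - 3) =
      [l[l.length-2]'(by omega), l[l.length-1]'(by omega), x] := by
  have h1 : (l ++ [x]).length - 3 = l.length - 2 := by simp
  rw [h1, List.drop_append_of_le_length (by omega), pvDrop2 l (by omega)]
  rfl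

lemma pvGetD_append_self (xs : List Int) (x d : Int) :
    PySem.List.pyGetD (xs ++ [x]) ((xs.length : Int)) d = x := by
  rw [PySem.List.pyGetD_natCast]
  rw [List.getD_eq_getElem _ _ (by simp)]
  simp

lemma pvStepB_three (n p a b d : Int)
    (vs : PySem.Set (Int × Int × Int × Int) × PySem.Dict (Int × Int × Int × Int) Int) :
    pvStepB (n, p, [a, b, d], vs) =
      (if PySem.Set.contains vs.1
            (a, b, d, PySem.Int.mod (pvNext n) 10 - PySem.Int.mod p 10)
       then (pvNext n, pvNext n,
             [b, d, PySem.Int.mod (pvNext n) 10 - PySem.Int.mod p 10], vs)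
       else (pvNext n, pvNext n,
             [b, d, PySem.Int.mod (pvNext n) 10 - PySem.Int.mod p 10],
             PySem.Set.add vs.1 (a, b, d, PySem.Int.mod (pvNext n) 10 - PySem.Int.mod p 10),
             vs.2.insert (a, b, d, PySem.Int.mod (pvNext n) 10 - PySem.Int.mod p 10)
               (vs.2.getD (a, b, d, PySem.Int.mod (pvNext n) 10 - PySem.Int.mod p 10) 0 +
                PySem.Int.mod (pvNext n) 10))) := rfl

-- main invariant: B's k-step streaming state, from A's k-step lists
lemma pvBA (k : Nat) (num : Int) (vis : PySem.Set (Int × Int × Int × Int))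
    (seq : PySem.Dict (Int × Int × Int × Int) Int) :
    pvStepB^[k] (num, num, [], (vis, seq)) =
      ((pvA k num).1, (pvA k num).2.1,
       (pvA k num).2.2.1.drop ((pvA k num).2.2.1.length - 3),
       (PySem.List.pyRange 3 (k : Int) 1).foldl
         (pvScanStep (pvA k num).2.2.1 (pvA k num).2.2.2) (vis, seq)) := by
  induction k with
  | zero =>
    simp [pvA, PySem.List.pyRange_one_eq_nil (by norm_num : (0:Int) ≤ 3)]
  | succ k ih =>
    rcases hA : pvA k num with ⟨n, p, ch, nm⟩
    have hstep : pvA (k+1) num = pvStepA (n, p, ch, nm) := by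
      rw [← hA]; exact Function.iterate_succ_apply' _ _ _
    have hc : ch.length = k := by
      have := (pvLenA k num).1; rw [hA] at this; simpa using this
    have hnm : nm.length = k := by
      have := (pvLenA k num).2; rw [hA] at this; simpa using this
    rw [Function.iterate_succ_apply', ih, hA, hstep]
    simp only [pvStepA]
    by_cases hk : 3 ≤ k
    · -- window is full: B updates seq exactly as A's scan step at index k
      have hch3 : 3 ≤ ch.length := by omega
      have hdrop := pvDrop3 ch hch3
      rw [hdrop]
      have hcast : ((k+1:Nat):Int) = (k:Int)+1 := by push_cast; ring
      rw [hcast, PySem.List.pyRange_one_succ_right (by exact_mod_cast hk), List.foldl_append]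
      -- the scan steps below index k do not look at the appended entries
      have hcong :
          (PySem.List.pyRange 3 (k:Int) 1).foldl
            (pvScanStep (ch ++ [PySem.Int.mod (pvNext n) 10 - PySem.Int.mod p 10])
                        (nm ++ [PySem.Int.mod (pvNext n) 10])) (vis, seq) =
          (PySem.List.pyRange 3 (k:Int) 1).foldl (pvScanStep ch nm) (vis, seq) := by
        apply PySem.List.foldl_congr_mem
        intro acc i hi
        obtain ⟨hi1, hi2⟩ := PySem.List.mem_pyRange_one.mp hi
        unfold pvScanStep
        rw [pvGetD_append_lt ch _ (i-3) 0 (by omega) (by rw [hc]; omega),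
            pvGetD_append_lt ch _ (i-2) 0 (by omega) (by rw [hc]; omega),
            pvGetD_append_lt ch _ (i-1) 0 (by omega) (by rw [hc]; omega),
            pvGetD_append_lt ch _ i 0 (by omega) (by rw [hc]; omega),
            pvGetD_append_lt nm _ i 0 (by omega) (by rw [hnm]; omega)]
      rw [hcong]
      simp only [List.foldl_cons, List.foldl_nil]
      rw [pvStepB_three, pvDropWin ch _ hch3]
      have g1 : PySem.List.pyGetD (ch ++ [PySem.Int.mod (pvNext n) 10 - PySem.Int.mod p 10]) ((k:Int)-3) 0
          = ch[ch.length-3]'(by omega) := by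
        rw [pvGetD_append_lt ch _ ((k:Int)-3) 0 (by omega) (by rw [hc]; omega),
            PySem.List.pyGetD_eq_getElem ch 0 (by omega) (by rw [hc]; omega)]
        simp only [show ((k:Int)-3).toNat = ch.length - 3 from by omega]
      have g2 : PySem.List.pyGetD (ch ++ [PySem.Int.mod (pvNext n) 10 - PySem.Int.mod p 10]) ((k:Int)-2) 0
          = ch[ch.length-2]'(by omega) := by
        rw [pvGetD_append_lt ch _ ((k:Int)-2) 0 (by omega) (by rw [hc]; omega),
            PySem.List.pyGetD_eq_getElem ch 0 (by omega) (by rw [hc]; omega)]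
        simp only [show ((k:Int)-2).toNat = ch.length - 2 from by omega]
      have g3 : PySem.List.pyGetD (ch ++ [PySem.Int.mod (pvNext n) 10 - PySem.Int.mod p 10]) ((k:Int)-1) 0
          = ch[ch.length-1]'(by omega) := by
        rw [pvGetD_append_lt ch _ ((k:Int)-1) 0 (by omega) (by rw [hc]; omega),
            PySem.List.pyGetD_eq_getElem ch 0 (by omega) (by rw [hc]; omega)]
        simp only [show ((k:Int)-1).toNat = ch.length - 1 from by omega]
      have g4 : PySem.List.pyGetD (ch ++ [PySem.Int.mod (pvNext n) 10 - PySem.Int.mod p 10]) ((k:Int)) 0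
          = PySem.Int.mod (pvNext n) 10 - PySem.Int.mod p 10 := by
        rw [show ((k:Nat):Int) = ((ch.length:Nat):Int) from by rw [hc]]
        exact pvGetD_append_self ch _ 0
      have g5 : PySem.List.pyGetD (nm ++ [PySem.Int.mod (pvNext n) 10]) ((k:Int)) 0
          = PySem.Int.mod (pvNext n) 10 := by
        rw [show ((k:Nat):Int) = ((nm.length:Nat):Int) from by rw [hnm]]
        exact pvGetD_append_self nm _ 0
      have e1 : pvScanStep (ch ++ [PySem.Int.mod (pvNext n) 10 - PySem.Int.mod p 10])
          (nm ++ [PySem.Int.mod (pvNext n) 10])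
          ((PySem.List.pyRange 3 (k:Int) 1).foldl (pvScanStep ch nm) (vis, seq)) (k:Int) =
          (let F := (PySem.List.pyRange 3 (k:Int) 1).foldl (pvScanStep ch nm) (vis, seq)
           let tup := (ch[ch.length-3]'(by omega), ch[ch.length-2]'(by omega),
                       ch[ch.length-1]'(by omega),
                       PySem.Int.mod (pvNext n) 10 - PySem.Int.mod p 10)
           if PySem.Set.contains F.1 tup then F
           else (PySem.Set.add F.1 tup,
                 F.2.modify tup 0 (· + PySem.Int.mod (pvNext n) 10))) := by
        unfold pvScanStep
        rw [g1, g2, g3, g4, g5]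
      rw [e1]
      simp only []
      by_cases hin : PySem.Set.contains
          ((PySem.List.pyRange 3 (k:Int) 1).foldl (pvScanStep ch nm) (vis, seq)).1
          (ch[ch.length-3]'(by omega), ch[ch.length-2]'(by omega),
           ch[ch.length-1]'(by omega),
           PySem.Int.mod (pvNext n) 10 - PySem.Int.mod p 10) = true
      · rw [if_pos hin, if_pos hin]
      · rw [if_neg hin, if_neg hin]
        rfl
    · -- fewer than three changes so far: B only extends the window
      have hdrop : ch.drop (ch.length - 3) = ch := by
        rw [hc, show k - 3 = 0 from by omega, List.drop_zero]
      have hr1 : PySem.List.pyRange 3 ((k:Nat):Int) 1 = [] :=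
        PySem.List.pyRange_one_eq_nil (by exact_mod_cast by omega : ((k:Nat):Int) ≤ 3)
      have hr2 : PySem.List.pyRange 3 (((k+1):Nat):Int) 1 = [] :=
        PySem.List.pyRange_one_eq_nil (by push_cast; omega)
      rw [hdrop, hr1, hr2]
      simp only [List.foldl_nil]
      rw [pvStepB_short n p ch (vis, seq) (by omega)]
      have hd2 : (ch ++ [PySem.Int.mod (pvNext n) 10 - PySem.Int.mod p 10]).drop
          ((ch ++ [PySem.Int.mod (pvNext n) 10 - PySem.Int.mod p 10]).length - 3) =
          ch ++ [PySem.Int.mod (pvNext n) 10 - PySem.Int.mod p 10] := by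
        rw [show (ch ++ [PySem.Int.mod (pvNext n) 10 - PySem.Int.mod p 10]).length - 3 = 0
            from by simp [hc]; omega, List.drop_zero]
      rw [hd2]

lemma pvInnerA (num : Int) :
    (PySem.List.pyRange 0 2000 1).foldl
        (fun (st : Int × Int × List Int × List Int) _ =>
          let n' := pvNext st.1
          (n', n', st.2.2.1 ++ [PySem.Int.mod n' 10 - PySem.Int.mod st.2.1 10],
           st.2.2.2 ++ [PySem.Int.mod n' 10]))
        (num, num, ([] : List Int), ([] : List Int)) = pvA 2000 num := by
  rw [show (fun (st : Int × Int × List Int × List Int) (_ : Int) =>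
        let n' := pvNext st.1
        (n', n', st.2.2.1 ++ [PySem.Int.mod n' 10 - PySem.Int.mod st.2.1 10],
         st.2.2.2 ++ [PySem.Int.mod n' 10])) = (fun st (_ : Int) => pvStepA st) from rfl,
      pvFoldl_const_iterate]
  rw [show (PySem.List.pyRange 0 2000 1).length = 2000 from by
        rw [PySem.List.length_pyRange_one]; decide]
  rfl

lemma pvInnerB (num : Int) (vis : PySem.Set (Int × Int × Int × Int))
    (seq : PySem.Dict (Int × Int × Int × Int) Int) :
    (PySem.List.pyRange 0 2000 1).foldl
        (fun (st : Int × Int × List Int × PySem.Set (Int × Int × Int × Int) ×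
                    PySem.Dict (Int × Int × Int × Int) Int) _ =>
          let n' := pvNext st.1
          let c := PySem.Int.mod n' 10 - PySem.Int.mod st.2.1 10
          match st.2.2.1 with
          | [a, b, d] =>
            if PySem.Set.contains st.2.2.2.1 (a, b, d, c) then (n', n', [b, d, c], st.2.2.2)
            else (n', n', [b, d, c], PySem.Set.add st.2.2.2.1 (a, b, d, c),
                  st.2.2.2.2.insert (a, b, d, c) (st.2.2.2.2.getD (a, b, d, c) 0 + PySem.Int.mod n' 10))
          | w => (n', n', w ++ [c], st.2.2.2))
        (num, num, ([] : List Int), (vis, seq)) =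
      ((pvA 2000 num).1, (pvA 2000 num).2.1,
       (pvA 2000 num).2.2.1.drop ((pvA 2000 num).2.2.1.length - 3),
       (PySem.List.pyRange 3 ((2000:Nat) : Int) 1).foldl
         (pvScanStep (pvA 2000 num).2.2.1 (pvA 2000 num).2.2.2) (vis, seq)) := by
  rw [show (fun (st : Int × Int × List Int × PySem.Set (Int × Int × Int × Int) ×
                    PySem.Dict (Int × Int × Int × Int) Int) (_ : Int) =>
          let n' := pvNext st.1
          let c := PySem.Int.mod n' 10 - PySem.Int.mod st.2.1 10
          match st.2.2.1 with
          | [a, b, d] =>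
            if PySem.Set.contains st.2.2.2.1 (a, b, d, c) then (n', n', [b, d, c], st.2.2.2)
            else (n', n', [b, d, c], PySem.Set.add st.2.2.2.1 (a, b, d, c),
                  st.2.2.2.2.insert (a, b, d, c) (st.2.2.2.2.getD (a, b, d, c) 0 + PySem.Int.mod n' 10))
          | w => (n', n', w ++ [c], st.2.2.2)) = (fun st (_ : Int) => pvStepB st) from rfl,
      pvFoldl_const_iterate]
  rw [show (PySem.List.pyRange 0 2000 1).length = 2000 from by
        rw [PySem.List.length_pyRange_one]; decide]
  exact pvBA 2000 num vis seq

-- the two per-secret loop bodies produce the same (dict, p1) update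
set_option maxRecDepth 16384 in
lemma pvOuter (nums : List Int) (init : PySem.Dict (Int × Int × Int × Int) Int × Int) :
    nums.foldl (fun (acc : PySem.Dict (Int × Int × Int × Int) Int × Int) num =>
      let st := (PySem.List.pyRange 0 2000 1).foldl
        (fun (st : Int × Int × List Int × List Int) _ =>
          let n' := pvNext st.1
          (n', n', st.2.2.1 ++ [PySem.Int.mod n' 10 - PySem.Int.mod st.2.1 10],
           st.2.2.2 ++ [PySem.Int.mod n' 10]))
        (num, num, ([] : List Int), ([] : List Int))
      let changes := st.2.2.1
      let nms := st.2.2.2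
      let p1' := acc.2 + st.1
      let scanned := (PySem.List.pyRange 3 (PySem.List.len changes) 1).foldl
        (fun (vs : PySem.Set (Int × Int × Int × Int) × PySem.Dict (Int × Int × Int × Int) Int) i =>
          let tup := (PySem.List.pyGetD changes (i-3) 0, PySem.List.pyGetD changes (i-2) 0,
                      PySem.List.pyGetD changes (i-1) 0, PySem.List.pyGetD changes i 0)
          if PySem.Set.contains vs.1 tup then vs
          else (PySem.Set.add vs.1 tup, vs.2.modify tup 0 (· + PySem.List.pyGetD nms i 0)))
        (PySem.Set.empty, acc.1)
      (scanned.2, p1')) init =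
    nums.foldl (fun (acc : PySem.Dict (Int × Int × Int × Int) Int × Int) num =>
      let st := (PySem.List.pyRange 0 2000 1).foldl
        (fun (st : Int × Int × List Int × PySem.Set (Int × Int × Int × Int) ×
                    PySem.Dict (Int × Int × Int × Int) Int) _ =>
          let n' := pvNext st.1
          let c := PySem.Int.mod n' 10 - PySem.Int.mod st.2.1 10
          match st.2.2.1 with
          | [a, b, d] =>
            if PySem.Set.contains st.2.2.2.1 (a, b, d, c) then (n', n', [b, d, c], st.2.2.2)
            else (n', n', [b, d, c], PySem.Set.add st.2.2.2.1 (a, b, d, c),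
                  st.2.2.2.2.insert (a, b, d, c) (st.2.2.2.2.getD (a, b, d, c) 0 + PySem.Int.mod n' 10))
          | w => (n', n', w ++ [c], st.2.2.2))
        (num, num, ([] : List Int), (PySem.Set.empty, acc.1))
      (st.2.2.2.2, acc.2 + st.1)) init := by
  apply PySem.List.foldl_congr_mem
  intro acc num _
  simp only []
  rw [pvInnerA, pvInnerB]
  have hlen : PySem.List.len (pvA 2000 num).2.2.1 = ((2000:Nat) : Int) := by
    rw [PySem.List.len_eq, (pvLenA 2000 num).1]
  rw [hlen]
  rw [show (fun (vs : PySem.Set (Int × Int × Int × Int) × PySem.Dict (Int × Int × Int × Int) Int)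
               (i : Int) =>
        if PySem.Set.contains vs.1
            (PySem.List.pyGetD (pvA 2000 num).2.2.1 (i-3) 0,
             PySem.List.pyGetD (pvA 2000 num).2.2.1 (i-2) 0,
             PySem.List.pyGetD (pvA 2000 num).2.2.1 (i-1) 0,
             PySem.List.pyGetD (pvA 2000 num).2.2.1 i 0) then vs
        else (PySem.Set.add vs.1
                (PySem.List.pyGetD (pvA 2000 num).2.2.1 (i-3) 0,
                 PySem.List.pyGetD (pvA 2000 num).2.2.1 (i-2) 0,
                 PySem.List.pyGetD (pvA 2000 num).2.2.1 (i-1) 0,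
                 PySem.List.pyGetD (pvA 2000 num).2.2.1 i 0),
              vs.2.modify
                (PySem.List.pyGetD (pvA 2000 num).2.2.1 (i-3) 0,
                 PySem.List.pyGetD (pvA 2000 num).2.2.1 (i-2) 0,
                 PySem.List.pyGetD (pvA 2000 num).2.2.1 (i-1) 0,
                 PySem.List.pyGetD (pvA 2000 num).2.2.1 i 0) 0
                (· + PySem.List.pyGetD (pvA 2000 num).2.2.2 i 0))) =
      pvScanStep (pvA 2000 num).2.2.1 (pvA 2000 num).2.2.2 from rfl]

-- ===== VERDICT (by name: the statement is the Claim_ definition above) =====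
set_option maxRecDepth 16384 in
theorem solve_spec : Claim_equal_solve := by
  intro data _ _
  unfold Spec_solve solve solve_alt
  simp only []
  rw [pvOuter]
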